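-- pv_equiv track=rewrite | github.com/lothar243/adventOfCode2023 | day12/part2.py | possible_patterns
-- ===== SOURCE A (Python) =====
-- def possible_patterns(pattern: list, brokenNums):
--     numUnknown = pattern.count("?")
--     numBrokenKnown = pattern.count("#")
--     numBrokenUnknown = sum(brokenNums) - numBrokenKnown
--     unknownLocations = [i for i, char in enumerate(pattern) if char == "?"]
--     # generate a list of . and # so that the total number of broken springs is correct
--     for i in range(2 ** numUnknown):
--         binaryString = f"{i:0>{numUnknown}b}"
--         if(binaryString.count("1") == numBrokenUnknown):
--             replacementString = binaryString.replace("1", "#").replace("0", ".")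
--             for j, location in enumerate(unknownLocations):
--                 pattern[location] = replacementString[j]
--             yield pattern
-- ===== SOURCE B (Python) =====
-- def possible_patterns(pattern: list, brokenNums):
--     # Backtracking over the '?' slots, pruning any branch whose remaining broken
--     # count cannot be completed, instead of scanning all 2**numUnknown bitmasks.
--     # Like A, it fills the '?' slots of `pattern` in place and yields the same
--     # list object.
--     unknownLocations = [i for i, char in enumerate(pattern) if char == "?"]
--     remaining = sum(brokenNums) - pattern.count("#")
--     if remaining < 0 or remaining > len(unknownLocations):
--         return
--
--     def fill(j, remaining):
--         if j == len(unknownLocations):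
--             yield pattern
--             return
--         nLeft = len(unknownLocations) - j - 1
--         if remaining <= nLeft:
--             pattern[unknownLocations[j]] = "."
--             yield from fill(j + 1, remaining)
--         if remaining >= 1:
--             pattern[unknownLocations[j]] = "#"
--             yield from fill(j + 1, remaining - 1)
--
--     yield from fill(0, remaining)
-- ===== Notes on version B (the rewrite author's own statement) =====
-- stated objective: alternative
-- what changed: A scans all 2**numUnknown bitmasks and keeps those with the right popcount; B backtracks over the '?' slots, pruning any branch whose remaining broken count cannot be completed, so it visits only the valid assignments (same yield order, same in-place mutation of pattern).
import Mathlib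
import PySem

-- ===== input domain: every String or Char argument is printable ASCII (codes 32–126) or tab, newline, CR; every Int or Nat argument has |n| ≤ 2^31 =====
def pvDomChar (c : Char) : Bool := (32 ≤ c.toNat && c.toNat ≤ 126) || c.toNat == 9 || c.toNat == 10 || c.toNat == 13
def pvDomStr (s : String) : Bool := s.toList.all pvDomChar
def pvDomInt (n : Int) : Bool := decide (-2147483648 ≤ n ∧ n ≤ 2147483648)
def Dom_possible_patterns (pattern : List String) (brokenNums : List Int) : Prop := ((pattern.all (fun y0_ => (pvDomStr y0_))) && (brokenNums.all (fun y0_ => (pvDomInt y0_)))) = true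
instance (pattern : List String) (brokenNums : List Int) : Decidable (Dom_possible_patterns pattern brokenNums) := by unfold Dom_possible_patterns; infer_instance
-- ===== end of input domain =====

-- Both Pythons are generators that yield the SAME list object `pattern`, mutated in
-- place; consumed as a list (how the differential tester and any `list(...)` caller
-- observes them) the value is `count` aliased references to `pattern`'s final state.
-- Both ports model exactly that: they thread the mutated pattern, count the yields,
-- and return `List.replicate count finalPattern`. The in-place mutation of `pattern`
-- (identical in A and B) is a side effect the equivalence below does not talk about.

-- ===== PORT A =====

-- format(i, 'b') for i ≥ 0: binary digits, MSB first, '0' for i = 0 (exact hand port)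
def pyBinDigits (i : Nat) : List Char :=
  if h : i = 0 then []
  else pyBinDigits (i / 2) ++ [if i % 2 = 1 then '1' else '0']
decreasing_by exact Nat.div_lt_self (Nat.pos_of_ne_zero h) (by omega)


-- f"{i:0>{w}b}" for i ≥ 0: format(i,'b') left-padded with '0' to width w (exact hand port)
def pyFormatBin (i w : Nat) : List Char :=
  let d := if i = 0 then ['0'] else pyBinDigits i
  List.replicate (w - d.length) '0' ++ d

def possible_patterns (pattern : List String) (brokenNums : List Int) : List (List String) :=
  let numUnknown := PySem.List.count pattern "?"
  let numBrokenKnown := PySem.List.count pattern "#"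
  let numBrokenUnknown : Int := brokenNums.sum - numBrokenKnown
  let unknownLocations : List Int :=
    (PySem.List.enumerate pattern 0).foldl
      (fun acc p => if p.2 == "?" then acc ++ [p.1] else acc) []
  let st :=
    (PySem.List.pyRange 0 ((2 : Int) ^ numUnknown) 1).foldl
      (fun (st : List String × Nat) i =>
        -- i ∈ range(2**numUnknown) is nonnegative, so .toNat is exact here
        let binaryString := pyFormatBin i.toNat numUnknown
        -- str.count("1") / replace of single characters: exact per-char hand ports
        if (binaryString.count '1' : Int) = numBrokenUnknown then
          let replacementString :=
            (binaryString.map (fun c => if c = '1' then '#' else c)).map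
              (fun c => if c = '0' then '.' else c)
          let pat' :=
            (PySem.List.enumerate unknownLocations 0).foldl
              (fun p q =>
                -- q.2 is an enumerate index of pattern, hence nonnegative and in
                -- range, so .toNat / the ' ' default are never exercised
                p.set q.2.toNat (String.ofList [(PySem.List.pyGet? replacementString q.1).getD ' ']))
              st.1
          (pat', st.2 + 1)
        else st)
      (pattern, 0)
  List.replicate st.2 st.1

-- ===== PORT B =====

-- the nested generator `fill(j, remaining)`: returns (final pattern state, number of yields)
def fillB (locs : List Int) (pat : List String) (j : Nat) (remaining : Int) :
    List String × Nat :=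
  -- Python tests j == len; every call has j ≤ len, where this is the same test
  if locs.length ≤ j then (pat, 1)
  else
    let nLeft : Int := (locs.length : Int) - j - 1
    let st1 :=
      if remaining ≤ nLeft then
        fillB locs (pat.set (locs.getD j 0).toNat ".") (j + 1) remaining
      else (pat, 0)
    if 1 ≤ remaining then
      let st2 := fillB locs (st1.1.set (locs.getD j 0).toNat "#") (j + 1) (remaining - 1)
      (st2.1, st1.2 + st2.2)
    else st1
termination_by locs.length - j
decreasing_by all_goals omega

def possible_patterns_alt (pattern : List String) (brokenNums : List Int) : List (List String) :=
  let unknownLocations : List Int :=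
    (PySem.List.enumerate pattern 0).filterMap (fun p => if p.2 == "?" then some p.1 else none)
  let remaining : Int := brokenNums.sum - PySem.List.count pattern "#"
  if remaining < 0 ∨ (unknownLocations.length : Int) < remaining then []
  else
    let st := fillB unknownLocations pattern 0 remaining
    List.replicate st.2 st.1

-- ===== PRECONDITION & SPEC =====
def Spec_possible_patterns (pattern : List String) (brokenNums : List Int) (out : List (List String)) : Prop := out = possible_patterns_alt pattern brokenNums
instance (pattern : List String) (brokenNums : List Int) (out : List (List String)) : Decidable (Spec_possible_patterns pattern brokenNums out) := by unfold Spec_possible_patterns; infer_instance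

-- ===== CLAIM (what is proved, stated in full; the proofs are below) =====
def Claim_equal_possible_patterns : Prop := ∀ (pattern : List String) (brokenNums : List Int), Dom_possible_patterns pattern brokenNums → Spec_possible_patterns pattern brokenNums (possible_patterns pattern brokenNums)


-- ===== LEMMAS AND PROOFS =====

-- proof-side vocabulary: bit strings, the write loop, and the two enumerations
def convS (c : Char) : String := if c = '1' then "#" else "."

def writeZ (pat : List String) (Z : List (Nat × String)) : List String :=
  Z.foldl (fun p q => p.set q.1 q.2) pat

def allS : Nat → List (List Char)
  | 0 => [[]]
  | m + 1 => (allS m).map (fun s => '0' :: s) ++ (allS m).map (fun s => '1' :: s)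

def bitsN : Nat → Nat → List Char
  | 0, _ => []
  | m + 1, i => if i < 2 ^ m then '0' :: bitsN m i else '1' :: bitsN m (i - 2 ^ m)

def genL : Nat → Int → List (List Char)
  | 0, r => if r = 0 then [[]] else []
  | m + 1, r =>
      (if r ≤ (m : Int) then (genL m r).map (fun s => '0' :: s) else []) ++
      (if 1 ≤ r then (genL m (r - 1)).map (fun s => '1' :: s) else [])

def locsOf (pattern : List String) : List Int :=
  ((PySem.List.enumerate pattern 0).filter (fun p => p.2 == "?")).map (·.1)

theorem writeZ_nil (pat : List String) : writeZ pat [] = pat := rfl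

theorem writeZ_cons (pat : List String) (l : Nat) (b : String) (Z : List (Nat × String)) :
    writeZ pat ((l, b) :: Z) = writeZ (pat.set l b) Z := rfl

theorem writeZ_length (Z : List (Nat × String)) : ∀ pat, (writeZ pat Z).length = pat.length := by
  induction Z with
  | nil => intro pat; rfl
  | cons q Z ih => intro pat; simp [writeZ] at *; simpa using ih (pat.set q.1 q.2)

theorem writeZ_getElem?_not_mem (Z : List (Nat × String)) :
    ∀ (pat : List String) (q : Nat), q ∉ Z.map (·.1) → (writeZ pat Z)[q]? = pat[q]? := by
  induction Z with
  | nil => intro pat q _; rfl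
  | cons z Z ih =>
    intro pat q hq
    simp only [List.map_cons, List.mem_cons, not_or] at hq
    rw [show (z :: Z : List (Nat × String)) = (z.1, z.2) :: Z from rfl, writeZ_cons]
    rw [ih _ q hq.2, List.getElem?_set_ne (fun h => hq.1 h.symm)]

theorem writeZ_congr (Z : List (Nat × String)) :
    ∀ (p p' : List String), p.length = p'.length →
      (∀ q : Nat, q ∉ Z.map (·.1) → p[q]? = p'[q]?) → writeZ p Z = writeZ p' Z := by
  induction Z with
  | nil =>
    intro p p' hlen hoff
    exact List.ext_getElem? (fun q => hoff q (by simp))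
  | cons z Z ih =>
    intro p p' hlen hoff
    rw [show (z :: Z : List (Nat × String)) = (z.1, z.2) :: Z from rfl, writeZ_cons, writeZ_cons]
    refine ih _ _ (by simp [hlen]) ?_
    intro q hq
    by_cases hql : q = z.1
    · rw [hql, List.getElem?_set_self', List.getElem?_set_self']
      by_cases hlt : z.1 < p.length
      · rw [List.getElem?_eq_getElem hlt, List.getElem?_eq_getElem (hlen ▸ hlt)]
        simp
      · rw [List.getElem?_eq_none (by omega), List.getElem?_eq_none (by omega)]
    · rw [List.getElem?_set_ne (fun h => hql h.symm), List.getElem?_set_ne (fun h => hql h.symm)]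
      refine hoff q ?_
      simp only [List.map_cons, List.mem_cons, not_or]
      exact ⟨hql, hq⟩

theorem length_of_mem_allS : ∀ (m : Nat) (s : List Char), s ∈ allS m → s.length = m := by
  intro m
  induction m with
  | zero => intro s hs; simp [allS] at hs; simp [hs]
  | succ m ih =>
    intro s hs
    simp only [allS, List.mem_append, List.mem_map] at hs
    rcases hs with ⟨t, ht, rfl⟩ | ⟨t, ht, rfl⟩ <;> simp [ih t ht]

theorem bitsN_length : ∀ (m i : Nat), (bitsN m i).length = m := by
  intro m
  induction m with
  | zero => intro i; rfl
  | succ m ih => intro i; by_cases h : i < 2 ^ m <;> simp [bitsN, h, ih]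

theorem range_map_bitsN : ∀ m : Nat, (List.range (2 ^ m)).map (bitsN m) = allS m := by
  intro m
  induction m with
  | zero => rfl
  | succ m ih =>
    have h2 : 2 ^ (m + 1) = 2 ^ m + 2 ^ m := by ring
    rw [h2, List.range_add, List.map_append, List.map_map, allS]
    congr 1
    · rw [← ih, List.map_map]
      refine List.map_congr_left ?_
      intro i hi
      simp only [List.mem_range] at hi
      simp [bitsN, Function.comp, hi]
    · rw [← ih, List.map_map]
      refine List.map_congr_left ?_
      intro i hi
      simp only [List.mem_range] at hi
      have : ¬ (2 ^ m + i < 2 ^ m) := by omega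
      simp [bitsN, Function.comp, this]

theorem pyBinDigits_zero : pyBinDigits 0 = [] := by rw [pyBinDigits]; simp

theorem pyBinDigits_one : pyBinDigits 1 = ['1'] := by
  rw [pyBinDigits]
  norm_num [pyBinDigits_zero]

theorem pyBinDigits_length_le : ∀ (m i : Nat), i < 2 ^ m → (pyBinDigits i).length ≤ m := by
  intro m
  induction m with
  | zero =>
    intro i hi
    have : i = 0 := by omega
    simp [this, pyBinDigits]
  | succ m ih =>
    intro i hi
    by_cases h0 : i = 0
    · simp [h0, pyBinDigits]
    · rw [pyBinDigits]
      simp only [h0, dite_false]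
      have := ih (i / 2) (by omega)
      simp only [List.length_append, List.length_cons, List.length_nil]
      omega

theorem bitsN_succ_lsb : ∀ (m i : Nat), i < 2 ^ (m + 1) →
    bitsN (m + 1) i = bitsN m (i / 2) ++ [if i % 2 = 1 then '1' else '0'] := by
  intro m
  induction m with
  | zero =>
    intro i hi
    have : i = 0 ∨ i = 1 := by omega
    rcases this with rfl | rfl <;> simp [bitsN]
  | succ m ih =>
    intro i hi
    have e1 : 2 ^ (m + 1 + 1) = 2 * 2 ^ (m + 1) := by ring
    have e2 : 2 ^ (m + 1) = 2 * 2 ^ m := by ring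
    by_cases h : i < 2 ^ (m + 1)
    · rw [show bitsN (m + 1 + 1) i = '0' :: bitsN (m + 1) i by simp [bitsN, h]]
      rw [ih i h]
      have hq : i / 2 < 2 ^ m := by omega
      rw [show bitsN (m + 1) (i / 2) = '0' :: bitsN m (i / 2) by simp [bitsN, hq]]
      rfl
    · rw [show bitsN (m + 1 + 1) i = '1' :: bitsN (m + 1) (i - 2 ^ (m + 1)) by simp [bitsN, h]]
      rw [ih (i - 2 ^ (m + 1)) (by omega)]
      have hq : ¬ (i / 2 < 2 ^ m) := by omega
      rw [show bitsN (m + 1) (i / 2) = '1' :: bitsN m (i / 2 - 2 ^ m) by simp [bitsN, hq]]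
      have harg : (i - 2 ^ (m + 1)) / 2 = i / 2 - 2 ^ m := by omega
      have hpar : (i - 2 ^ (m + 1)) % 2 = i % 2 := by omega
      rw [harg, hpar]
      rfl

theorem pyBinDigits_eq_bitsN : ∀ (m i : Nat), 2 ^ m ≤ i → i < 2 ^ (m + 1) →
    pyBinDigits i = bitsN (m + 1) i := by
  intro m
  induction m with
  | zero =>
    intro i h1 h2
    have e0 : (2 : Nat) ^ 0 = 1 := rfl
    have e1 : (2 : Nat) ^ 1 = 2 := rfl
    have : i = 1 := by omega
    subst this
    rw [pyBinDigits_one]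
    simp [bitsN]
  | succ m ih =>
    intro i h1 h2
    have e1 : 2 ^ (m + 1 + 1) = 2 * 2 ^ (m + 1) := by ring
    have e2 : 2 ^ (m + 1) = 2 * 2 ^ m := by ring
    have hpos : 0 < 2 ^ (m + 1) := Nat.two_pow_pos (m + 1)
    have h0 : i ≠ 0 := by omega
    rw [pyBinDigits]
    simp only [h0, dite_false]
    rw [ih (i / 2) (by omega) (by omega), ← bitsN_succ_lsb (m + 1) i h2]

theorem pyFormatBin_eq_bitsN : ∀ (m : Nat), 1 ≤ m → ∀ i, i < 2 ^ m → pyFormatBin i m = bitsN m i := by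
  intro m
  induction m with
  | zero => intro h; omega
  | succ m ih =>
    intro _ i hi
    by_cases hm : m = 0
    · subst hm
      have : i = 0 ∨ i = 1 := by omega
      rcases this with rfl | rfl
      · simp [pyFormatBin, bitsN]
      · rw [pyFormatBin]
        norm_num [pyBinDigits_one, bitsN]
    · by_cases hlow : i < 2 ^ m
      · have hlen : (if i = 0 then ['0'] else pyBinDigits i).length ≤ m := by
          by_cases h0 : i = 0
          · simp [h0]; omega
          · simp [h0]; exact pyBinDigits_length_le m i hlow
        have : pyFormatBin i (m + 1) = '0' :: pyFormatBin i m := by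
          unfold pyFormatBin
          simp only []
          rw [show m + 1 - (if i = 0 then ['0'] else pyBinDigits i).length
              = (m - (if i = 0 then ['0'] else pyBinDigits i).length) + 1 by omega]
          rw [List.replicate_succ]
          rfl
        rw [this, ih (by omega) i hlow]
        simp [bitsN, hlow]
      · have h0 : i ≠ 0 := by
          have := Nat.two_pow_pos m
          omega
        have hdig : pyBinDigits i = bitsN (m + 1) i :=
          pyBinDigits_eq_bitsN m i (by omega) hi
        unfold pyFormatBin
        simp only [h0, if_false]
        rw [hdig, bitsN_length]
        simp

theorem genL_eq_filter : ∀ (m : Nat) (r : Int), 0 ≤ r →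
    genL m r = (allS m).filter (fun s => decide ((s.count '1' : Int) = r)) := by
  intro m
  induction m with
  | zero =>
    intro r hr
    by_cases h : r = 0 <;> simp [genL, allS, h] <;> omega
  | succ m ih =>
    intro r hr
    have hcount : ∀ s ∈ allS m, (s.count '1' : Int) ≤ (m : Int) := by
      intro s hs
      have h1 : s.count '1' ≤ s.length := List.count_le_length
      have h2 : s.length = m := length_of_mem_allS m s hs
      exact_mod_cast h2 ▸ h1
    have e0 : ∀ s : List Char, List.count '1' ('0' :: s) = List.count '1' s := by
      intro s; simp [List.count_cons]
    have e1 : ∀ s : List Char, List.count '1' ('1' :: s) = List.count '1' s + 1 := by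
      intro s; simp [List.count_cons]
    rw [genL, allS, List.filter_append, List.filter_map, List.filter_map]
    congr 1
    · by_cases h : r ≤ (m : Int)
      · rw [if_pos h, ih r hr]
        refine congrArg _ (List.filter_congr ?_)
        intro s _
        simp [Function.comp, e0]
      · rw [if_neg h]
        symm
        rw [List.map_eq_nil_iff, List.filter_eq_nil_iff]
        intro s hs
        simp only [Function.comp, e0, decide_eq_true_eq]
        have := hcount s hs
        intro hc
        omega
    · by_cases h : 1 ≤ r
      · rw [if_pos h, ih (r - 1) (by omega)]
        refine congrArg _ (List.filter_congr ?_)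
        intro s _
        simp only [Function.comp, e1, decide_eq_decide]
        push_cast
        omega
      · rw [if_neg h]
        symm
        rw [List.map_eq_nil_iff, List.filter_eq_nil_iff]
        intro s hs
        simp only [Function.comp, e1, decide_eq_true_eq]
        intro hc
        have : (0 : Int) ≤ (s.count '1' : Int) := by positivity
        push_cast at hc
        omega

theorem genL_ne_nil : ∀ (m : Nat) (r : Int), 0 ≤ r → r ≤ (m : Int) → genL m r ≠ [] := by
  intro m
  induction m with
  | zero =>
    intro r h1 h2
    have : r = 0 := by exact_mod_cast le_antisymm h2 h1
    simp [genL, this]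
  | succ m ih =>
    intro r h1 h2
    rw [genL]
    by_cases h : r ≤ (m : Int)
    · have := ih r h1 h
      simp only [h, if_true]
      intro hc
      rcases List.append_eq_nil_iff.1 hc with ⟨hl, _⟩
      exact this (List.map_eq_nil_iff.1 hl)
    · have hr1 : 1 ≤ r := by push_cast at h ⊢; omega
      have := ih (r - 1) (by omega) (by push_cast at h ⊢; omega)
      simp only [hr1, if_true]
      intro hc
      rcases List.append_eq_nil_iff.1 hc with ⟨_, hrn⟩
      exact this (List.map_eq_nil_iff.1 hrn)

theorem length_of_mem_genL (m : Nat) (r : Int) (hr : 0 ≤ r) (s : List Char)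
    (hs : s ∈ genL m r) : s.length = m := by
  rw [genL_eq_filter m r hr] at hs
  exact length_of_mem_allS m s (List.mem_of_mem_filter hs)

theorem length_filter_enumerate (v : String) :
    ∀ (xs : List String) (s : Int), ((PySem.List.enumerate xs s).filter (fun p => p.2 == v)).length = xs.count v := by
  intro xs
  induction xs with
  | nil => intro s; rfl
  | cons x xs ih =>
    intro s
    rw [PySem.List.enumerate_cons, List.filter_cons, List.count_cons]
    by_cases h : x == v
    · simp only [h, if_true, List.length_cons, ih (s + 1)]
    · simp only [h, Bool.false_eq_true, if_false, ih (s + 1)]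
      simp

theorem length_locsOf (pattern : List String) :
    (locsOf pattern).length = List.count "?" pattern := by
  rw [locsOf, List.length_map, length_filter_enumerate]

theorem filterMap_locs (pattern : List String) :
    (PySem.List.enumerate pattern 0).filterMap (fun p => if p.2 == "?" then some p.1 else none)
      = locsOf pattern := by
  rw [locsOf]
  induction (PySem.List.enumerate pattern 0) with
  | nil => rfl
  | cons q l ih =>
    rw [List.filterMap_cons, List.filter_cons]
    by_cases h : q.2 == "?"
    · simp only [h, if_true, List.map_cons, ih]
    · simp only [h, Bool.false_eq_true, if_false, ih]

theorem getLastD_of_ne_nil {α : Type} (l : List α) (h : l ≠ []) (d d' : α) :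
    l.getLastD d = l.getLastD d' := by
  rw [List.getLastD_eq_getLast?, List.getLastD_eq_getLast?, List.getLast?_eq_getLast h]
  rfl

theorem getLastD_append_ne {α : Type} (X Y : List α) (h : Y ≠ []) (d : α) :
    (X ++ Y).getLastD d = Y.getLastD d := by
  rw [List.getLastD_eq_getLast?, List.getLastD_eq_getLast?, List.getLast?_append,
    List.getLast?_eq_getLast h]
  rfl

theorem getLastD_map_ne {α β : Type} (l : List α) (h : l ≠ []) (f : α → β) (d : β) (d' : α) :
    (l.map f).getLastD d = f (l.getLastD d') := by
  rw [List.getLastD_eq_getLast?, List.getLastD_eq_getLast?, List.getLast?_map,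
    List.getLast?_eq_getLast h]
  rfl

theorem getLastD_mem {α : Type} (l : List α) (h : l ≠ []) (d : α) : l.getLastD d ∈ l := by
  rw [List.getLastD_eq_getLast?, List.getLast?_eq_getLast h]
  exact List.getLast_mem h

-- overwriting the same index set: only the second pass survives
theorem writeZ_collapse (natlocs : List Nat) (b1 b2 : List String) (pat : List String)
    (h1 : b1.length = natlocs.length) (h2 : b2.length = natlocs.length) :
    writeZ (writeZ pat (natlocs.zip b1)) (natlocs.zip b2) = writeZ pat (natlocs.zip b2) := by
  refine writeZ_congr _ _ _ (writeZ_length _ _) ?_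
  intro q hq
  rw [List.map_fst_zip (by omega)] at hq
  exact writeZ_getElem?_not_mem _ _ q (by rwa [List.map_fst_zip (by omega)])

-- one branch write followed by the other branch's overwrite of the same slot and tail slots
theorem set_writeZ_set_collapse (dropmap : List Nat) (b1 b2 : List String)
    (h1 : b1.length = dropmap.length) (h2 : b2.length = dropmap.length)
    (pat : List String) (l : Nat) (v v' : String) :
    writeZ ((writeZ (pat.set l v) (dropmap.zip b1)).set l v') (dropmap.zip b2)
      = writeZ (pat.set l v') (dropmap.zip b2) := by
  refine writeZ_congr _ _ _ (by simp [writeZ_length]) ?_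
  intro q hq
  rw [List.map_fst_zip (by omega)] at hq
  by_cases hql : q = l
  · subst hql
    rw [List.getElem?_set_self', List.getElem?_set_self',
      writeZ_getElem?_not_mem _ _ q (by rwa [List.map_fst_zip (by omega)]),
      List.getElem?_set_self']
    cases pat[q]? <;> rfl
  · rw [List.getElem?_set_ne (fun h => hql h.symm),
      writeZ_getElem?_not_mem _ _ q (by rwa [List.map_fst_zip (by omega)]),
      List.getElem?_set_ne (fun h => hql h.symm),
      List.getElem?_set_ne (fun h => hql h.symm)]

-- A's inner write loop (enumerate + string index) is writeZ of the zipped locations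
theorem enumWrite (repl : List Char) :
    ∀ (ls : List Int) (s : Nat) (pat : List String), s + ls.length ≤ repl.length →
      (PySem.List.enumerate ls (s : Int)).foldl
          (fun p q => p.set q.2.toNat (String.ofList [(PySem.List.pyGet? repl q.1).getD ' '])) pat
        = writeZ pat ((ls.map (·.toNat)).zip ((repl.drop s).map (fun c => String.ofList [c]))) := by
  intro ls
  induction ls with
  | nil => intro s pat _; rfl
  | cons l ls ih =>
    intro s pat hlen
    simp only [List.length_cons] at hlen
    have hs : s < repl.length := by omega
    rw [PySem.List.enumerate_cons, List.foldl_cons, List.drop_eq_getElem_cons hs,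
      List.map_cons, List.map_cons, List.zip_cons_cons, writeZ_cons]
    rw [PySem.List.pyGet?_natCast, List.getElem?_eq_getElem hs]
    have : ((s : Int) + 1) = ((s + 1 : Nat) : Int) := by push_cast; ring
    rw [this, ih (s + 1) _ (by omega)]
    rfl

-- A's outer loop over candidate strings, collapsed: only the last accepted write survives,
-- and the yield count is the number of accepted strings
theorem foldA (natlocs : List Nat) (k : Int) :
    ∀ (L : List (List Char)), (∀ s ∈ L, s.length = natlocs.length) →
      ∀ (pat : List String) (c : Nat),
      L.foldl (fun (st : List String × Nat) s =>
          if (s.count '1' : Int) = k then (writeZ st.1 (natlocs.zip (s.map convS)), st.2 + 1) else st)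
        (pat, c)
      = (if h : (L.filter (fun s => decide ((s.count '1' : Int) = k))) = [] then pat
         else writeZ pat (natlocs.zip
            (((L.filter (fun s => decide ((s.count '1' : Int) = k))).getLastD []).map convS)),
         c + (L.filter (fun s => decide ((s.count '1' : Int) = k))).length) := by
  intro L
  induction L with
  | nil => intro _ pat c; simp [writeZ_nil]
  | cons sL L ih =>
    intro hlen pat c
    have hsL : sL.length = natlocs.length := hlen sL (by simp)
    have hlen' : ∀ s ∈ L, s.length = natlocs.length := fun s hs => hlen s (by simp [hs])
    rw [List.foldl_cons, List.filter_cons]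
    by_cases hp : (sL.count '1' : Int) = k
    · rw [if_pos hp, if_pos (by simp [hp])]
      rw [ih hlen' (writeZ pat (natlocs.zip (sL.map convS))) (c + 1)]
      set F := L.filter (fun s => decide ((s.count '1' : Int) = k)) with hF
      by_cases hFn : F = []
      · rw [dif_pos hFn, dif_neg (List.cons_ne_nil _ _), hFn]
        refine Prod.ext ?_ (by simp)
        simp only [List.getLastD_cons, List.getLastD_nil]
      · rw [dif_neg hFn, dif_neg (List.cons_ne_nil _ _)]
        have hlast : F.getLastD [] ∈ F := getLastD_mem F hFn []
        have hlastL : (F.getLastD []).length = natlocs.length :=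
          hlen' _ (List.mem_of_mem_filter hlast)
        refine Prod.ext ?_ (by simp; omega)
        simp only []
        rw [show ((sL :: F).getLastD []) = F.getLastD [] by
          rw [List.getLastD_cons]; exact getLastD_of_ne_nil F hFn sL []]
        exact writeZ_collapse natlocs (sL.map convS) ((F.getLastD []).map convS) pat
          (by simp [hsL]) (by rw [List.length_map]; exact hlastL)
    · rw [if_neg hp, if_neg (by simp [hp])]
      exact ih hlen' pat c

theorem fillB_spec (locs : List Int) :
    ∀ (m j : Nat) (r : Int) (pat : List String), j + m = locs.length → 0 ≤ r → r ≤ (m : Int) →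
      fillB locs pat j r
        = (writeZ pat (((locs.drop j).map (·.toNat)).zip (((genL m r).getLastD []).map convS)),
           (genL m r).length) := by
  intro m
  induction m with
  | zero =>
    intro j r pat hj h0 h1
    have hr : r = 0 := le_antisymm (by exact_mod_cast h1) h0
    subst hr
    rw [fillB, if_pos (by omega)]
    simp [genL, writeZ_nil]
  | succ m ih =>
    intro j r pat hj h0 h1
    have hlt : j < locs.length := by omega
    have hmlen : locs.length - (j + 1) = m := by omega
    rw [fillB, if_neg (by omega)]
    simp only []
    rw [show ((locs.length : Int) - ↑j - 1) = (m : Int) by push_cast; omega]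
    rw [List.getD_eq_getElem locs 0 hlt, List.drop_eq_getElem_cons hlt]
    set lj : Int := locs[j]'hlt with hlj
    have hdropLen : ((locs.drop (j + 1)).map (fun x => x.toNat)).length = m := by
      simp [hmlen]
    by_cases hA : r ≤ (m : Int)
    · rw [if_pos hA]
      rw [ih (j + 1) r (pat.set lj.toNat ".") (by omega) h0 hA]
      have hne1 : genL m r ≠ [] := genL_ne_nil m r h0 hA
      by_cases hB : 1 ≤ r
      · -- both branches taken; the '#' pass overwrites the '.' pass
        have hne2 : genL m (r - 1) ≠ [] := genL_ne_nil m (r - 1) (by omega) (by omega)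
        rw [if_pos hB, ih (j + 1) (r - 1) _ (by omega) (by omega) (by omega)]
        have hgen : genL (m + 1) r
            = (genL m r).map (fun s => '0' :: s) ++ (genL m (r - 1)).map (fun s => '1' :: s) := by
          rw [genL, if_pos hA, if_pos hB]
        have hlastgen : (genL (m + 1) r).getLastD [] = '1' :: (genL m (r - 1)).getLastD [] := by
          rw [hgen, getLastD_append_ne ((genL m r).map (fun s => '0' :: s))
              ((genL m (r - 1)).map (fun s => '1' :: s)) (by simpa using hne2) [],
            getLastD_map_ne (genL m (r - 1)) hne2 (fun s => '1' :: s) [] []]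
        refine Prod.ext ?_ ?_
        · simp only []
          simp only [hlastgen, List.map_cons, List.zip_cons_cons, writeZ_cons]
          show writeZ ((writeZ (pat.set lj.toNat ".") _).set lj.toNat (convS '1')) _ = _
          rw [show convS '1' = "#" from rfl]
          exact set_writeZ_set_collapse _ _ _
            (by rw [List.length_map, hdropLen]
                exact length_of_mem_genL m r h0 _ (getLastD_mem _ hne1 []))
            (by rw [List.length_map, hdropLen]
                exact length_of_mem_genL m (r - 1) (by omega) _ (getLastD_mem _ hne2 []))
            pat lj.toNat "." "#"
        · simp only []
          rw [hgen]
          simp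
      · -- r = 0: only the '.' branch exists
        have hr0 : r = 0 := by omega
        rw [if_neg hB]
        have hgen : genL (m + 1) r = (genL m r).map (fun s => '0' :: s) := by
          rw [genL, if_pos hA, if_neg hB, List.append_nil]
        have hlastgen : (genL (m + 1) r).getLastD [] = '0' :: (genL m r).getLastD [] := by
          rw [hgen, getLastD_map_ne (genL m r) hne1 (fun s => '0' :: s) [] []]
        refine Prod.ext ?_ ?_
        · simp only []
          simp only [hlastgen, List.map_cons, List.zip_cons_cons, writeZ_cons]
          rfl
        · simp only []
          rw [hgen, List.length_map]
    · -- r = m + 1: only the '#' branch exists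
      rw [if_neg hA]
      have hB : 1 ≤ r := by push_cast at hA h1 ⊢; omega
      rw [if_pos hB]
      have hne2 : genL m (r - 1) ≠ [] := genL_ne_nil m (r - 1) (by omega) (by push_cast at hA h1 ⊢; omega)
      rw [ih (j + 1) (r - 1) _ (by omega) (by omega) (by push_cast at hA h1 ⊢; omega)]
      have hgen : genL (m + 1) r = (genL m (r - 1)).map (fun s => '1' :: s) := by
        rw [genL, if_neg hA, if_pos hB, List.nil_append]
      have hlastgen : (genL (m + 1) r).getLastD [] = '1' :: (genL m (r - 1)).getLastD [] := by
        rw [hgen, getLastD_map_ne (genL m (r - 1)) hne2 (fun s => '1' :: s) [] []]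
      refine Prod.ext ?_ ?_
      · simp only []
        simp only [hlastgen, List.map_cons, List.zip_cons_cons, writeZ_cons]
        rfl
      · simp only []
        rw [hgen, List.length_map]
        omega

theorem bitsN_binary : ∀ (m i : Nat), ∀ c ∈ bitsN m i, c = '0' ∨ c = '1' := by
  intro m
  induction m with
  | zero => intro i c hc; simp [bitsN] at hc
  | succ m ih =>
    intro i c hc
    by_cases h : i < 2 ^ m <;> simp only [bitsN, h, if_true, if_false] at hc <;>
      rcases List.mem_cons.1 hc with rfl | hc <;> first | (left; rfl) | (right; rfl) | exact ih _ c hc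

-- ===== VERDICT (by name: the statement is the Claim_ definition above) =====
theorem possible_patterns_spec : Claim_equal_possible_patterns := by
  intro pattern brokenNums _
  unfold Spec_possible_patterns
  simp only [possible_patterns, possible_patterns_alt]
  rw [show (PySem.List.enumerate pattern 0).foldl
        (fun acc p => if p.2 == "?" then acc ++ [p.1] else acc) ([] : List Int) = locsOf pattern by
      rw [PySem.List.foldl_append_if]; simp [locsOf]]
  rw [filterMap_locs pattern]
  set k : Int := brokenNums.sum - ↑(PySem.List.count pattern "#") with hk
  set n : Nat := PySem.List.count pattern "?" with hn
  have hlen : (locsOf pattern).length = n := by rw [length_locsOf, hn, PySem.List.count_eq]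
  by_cases h0 : n = 0
  · -- no '?' at all: one candidate ("0"), accepted iff k = 0
    have hnil : locsOf pattern = [] := List.eq_nil_of_length_eq_zero (by omega)
    rw [hnil, h0]
    rw [show PySem.List.pyRange 0 ((2 : Int) ^ 0) 1 = [0] by
      rw [show ((2 : Int) ^ 0) = 0 + 1 by norm_num]; exact PySem.List.pyRange_one_singleton 0]
    rw [List.foldl_cons, List.foldl_nil]
    have hfmt : pyFormatBin (0 : Int).toNat 0 = ['0'] := by simp [pyFormatBin]
    rw [hfmt]
    by_cases hkz : ((['0'].count '1' : Nat) : Int) = k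
    · rw [if_pos hkz]
      simp only [PySem.List.enumerate_nil, List.foldl_nil]
      have hkz' : k = 0 := by simpa using hkz.symm
      rw [if_neg (by simp; omega)]
      rw [show fillB [] pattern 0 k = (pattern, 1) by rw [fillB]; simp]
    · rw [if_neg hkz]
      have : k ≠ 0 := by simpa using fun h => hkz (by simp [h])
      rw [if_pos (by simp; omega)]
      rfl
  · -- n ≥ 1
    have hn1 : 1 ≤ n := by omega
    have hnatlen : ((locsOf pattern).map (fun x => x.toNat)).length = n := by
      rw [List.length_map, hlen]
    -- A: range → allS, body → writeZ form
    rw [show PySem.List.pyRange 0 ((2 : Int) ^ n) 1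
          = (List.range (2 ^ n)).map (fun i : Nat => (i : Int)) by
        rw [PySem.List.pyRange_one]
        have h2 : ((2 : Int) ^ n) = ((2 ^ n : Nat) : Int) := by push_cast; ring
        rw [sub_zero, h2, Int.toNat_natCast]
        simp only [zero_add]]
    rw [List.foldl_map]
    rw [PySem.List.foldl_congr_mem (List.range (2 ^ n)) _
        (fun (st : List String × Nat) i =>
          if ((bitsN n i).count '1' : Int) = k then
            (writeZ st.1 (((locsOf pattern).map (fun x => x.toNat)).zip ((bitsN n i).map convS)),
             st.2 + 1)
          else st)
        (pattern, 0) ?hbody]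
    case hbody =>
      intro st i hi
      rw [List.mem_range] at hi
      rw [show ((i : Int)).toNat = i from Int.toNat_natCast i]
      rw [pyFormatBin_eq_bitsN n hn1 i hi]
      beta_reduce
      by_cases hc : ((bitsN n i).count '1' : Int) = k
      · rw [if_pos hc, if_pos hc]
        have hblen : (bitsN n i).length = n := bitsN_length n i
        have hwrite := enumWrite
          (((bitsN n i).map (fun c => if c = '1' then '#' else c)).map (fun c => if c = '0' then '.' else c))
          (locsOf pattern) 0 st.1 (by simp [hblen, hlen])
        rw [show ((0 : Nat) : Int) = (0 : Int) from rfl] at hwrite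
        rw [hwrite, List.drop_zero]
        have hmap : List.map (fun c => String.ofList [c])
              (List.map (fun c => if c = '0' then '.' else c)
                (List.map (fun c => if c = '1' then '#' else c) (bitsN n i)))
            = (bitsN n i).map convS := by
          rw [List.map_map, List.map_map]
          refine List.map_congr_left ?_
          intro c hc'
          rcases bitsN_binary n i c hc' with rfl | rfl <;> rfl
        rw [hmap]
      · rw [if_neg hc, if_neg hc]
    rw [show List.foldl
          (fun (st : List String × Nat) i =>
            if ((bitsN n i).count '1' : Int) = k then
              (writeZ st.1 (((locsOf pattern).map (fun x => x.toNat)).zip ((bitsN n i).map convS)),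
               st.2 + 1)
            else st)
          (pattern, 0) (List.range (2 ^ n))
        = List.foldl
          (fun (st : List String × Nat) s =>
            if (s.count '1' : Int) = k then
              (writeZ st.1 (((locsOf pattern).map (fun x => x.toNat)).zip (s.map convS)), st.2 + 1)
            else st)
          (pattern, 0) (allS n) by
      rw [← range_map_bitsN n, List.foldl_map]]
    rw [foldA ((locsOf pattern).map (fun x => x.toNat)) k (allS n)
        (fun s hs => by rw [length_of_mem_allS n s hs, hnatlen]) pattern 0]
    -- B side
    by_cases hg : k < 0 ∨ ((locsOf pattern).length : Int) < k
    · rw [if_pos hg]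
      have hF : (allS n).filter (fun s => decide ((s.count '1' : Int) = k)) = [] := by
        rw [List.filter_eq_nil_iff]
        intro s hs
        have h1 : s.count '1' ≤ n :=
          (length_of_mem_allS n s hs) ▸ List.count_le_length
        simp only [decide_eq_true_eq]
        rw [hlen] at hg
        intro hcc
        omega
      rw [hF]
      simp
    · rw [if_neg hg]
      rw [hlen] at hg
      have hk0 : 0 ≤ k := by omega
      have hkn : k ≤ (n : Int) := by omega
      have hgen : (allS n).filter (fun s => decide ((s.count '1' : Int) = k)) = genL n k :=
        (genL_eq_filter n k hk0).symm
      rw [hgen]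
      have hfill := fillB_spec (locsOf pattern) n 0 k pattern (by omega) hk0 hkn
      rw [List.drop_zero] at hfill
      rw [hfill]
      rw [dif_neg (genL_ne_nil n k hk0 hkn)]
      simp
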